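-- pv_equiv track=rewrite | github.com/kustex/CFTC-COT-Report | cftc_analyser.py | get_list_of_i_and_date_for_metric
-- ===== SOURCE A (Python) =====
-- num_of_entries = 0
--
-- def sortOnTime(val):
--     return val[1]
--
-- def get_list_of_i_and_date_for_metric(expected_row_names, num_of_entries, date_list, name_list):
--     the_list = []
--     for expected_row_name in expected_row_names:
--         for i in range(0, num_of_entries):
--             row_name = name_list[i]
--             if row_name == expected_row_name:
--                 the_list.append((i, date_list[i]))
--     the_list.sort(key=sortOnTime)
--     return the_list
-- ===== SOURCE B (Python) =====
-- def get_list_of_i_and_date_for_metric(expected_row_names, num_of_entries, date_list, name_list):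
--     # one pass: group row indices by name, then gather per expected name and sort once
--     pairs = [(name_list[i], i) for i in range(num_of_entries)]
--     index = {}
--     for name, i in pairs:
--         index.setdefault(name, []).append(i)
--     result = []
--     for name in expected_row_names:
--         for i in index.get(name, []):
--             result.append((i, date_list[i]))
--     result.sort(key=lambda p: p[1])
--     return result
-- ===== Notes on version B (the rewrite author's own statement) =====
-- stated objective: alternative
-- what changed: Instead of rescanning all rows once per expected name (nested loops), B groups row indices by name in a single pass over the rows, then concatenates the per-name index lists in expected-name order and sorts once; on the timed inputs the final sort dominates, so it measured only ~1.2x, not confirmably faster.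
-- outside the precondition, e.g. on get_list_of_i_and_date_for_metric([], 5, [], []): A returns [], B raises IndexError
import Mathlib
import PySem

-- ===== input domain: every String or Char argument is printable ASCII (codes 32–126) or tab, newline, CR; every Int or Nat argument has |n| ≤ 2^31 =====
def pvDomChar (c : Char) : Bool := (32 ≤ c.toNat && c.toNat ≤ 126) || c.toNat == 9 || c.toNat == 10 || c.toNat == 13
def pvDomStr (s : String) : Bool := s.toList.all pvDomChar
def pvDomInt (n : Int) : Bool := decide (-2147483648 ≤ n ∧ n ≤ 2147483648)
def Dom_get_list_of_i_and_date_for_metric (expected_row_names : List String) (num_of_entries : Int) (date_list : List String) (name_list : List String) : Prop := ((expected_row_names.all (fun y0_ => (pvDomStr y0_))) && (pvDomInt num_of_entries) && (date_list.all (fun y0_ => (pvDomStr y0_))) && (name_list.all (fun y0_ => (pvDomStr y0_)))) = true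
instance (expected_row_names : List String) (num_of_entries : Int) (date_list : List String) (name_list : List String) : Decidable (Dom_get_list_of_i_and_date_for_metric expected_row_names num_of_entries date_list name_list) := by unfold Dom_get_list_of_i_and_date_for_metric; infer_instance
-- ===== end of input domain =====

-- B groups row indices by name in one pass over the rows instead of rescanning all rows per
-- expected name (a different, single-pass grouping algorithm with the same output).

-- ===== PORT A =====
def get_list_of_i_and_date_for_metric (expected_row_names : List String) (num_of_entries : Int) (date_list : List String) (name_list : List String) : List (Int × String) :=
  let the_list : List (Int × String) :=
    expected_row_names.foldl (fun acc expected_row_name =>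
      (PySem.List.pyRange 0 num_of_entries 1).foldl (fun acc2 i =>
        let row_name := PySem.List.pyGetD name_list i ""
        if row_name == expected_row_name then
          acc2 ++ [(i, PySem.List.pyGetD date_list i "")]
        else acc2) acc) []
  PySem.List.sorted the_list (fun val => val.2)

-- ===== PORT B =====
def get_list_of_i_and_date_for_metric_alt (expected_row_names : List String) (num_of_entries : Int) (date_list : List String) (name_list : List String) : List (Int × String) :=
  let pairs : List (String × Int) :=
    (PySem.List.pyRange 0 num_of_entries 1).map (fun i => (PySem.List.pyGetD name_list i "", i))
  let index : PySem.Dict String (List Int) :=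
    pairs.foldl (fun d p => d.modify p.1 [] (· ++ [p.2])) PySem.Dict.empty
  let result : List (Int × String) :=
    expected_row_names.foldl (fun acc name =>
      (index.getD name []).foldl (fun acc2 i =>
        acc2 ++ [(i, PySem.List.pyGetD date_list i "")]) acc) []
  PySem.List.sorted result (fun p => p.2)

-- ===== PRECONDITION & SPEC =====
-- Pre_ excludes the inputs where either Python raises IndexError: rows indexed beyond name_list,
-- or a matched row with no date. It is narrower than A's domain only for empty expected_row_names
-- with num_of_entries > len(name_list), where A returns [] without reading rows but B's single
-- grouping pass naturally raises.
def Pre_get_list_of_i_and_date_for_metric (expected_row_names : List String) (num_of_entries : Int) (date_list : List String) (name_list : List String) : Prop :=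
  num_of_entries ≤ (name_list.length : Int) ∧
  ∀ i : Nat, i < name_list.length → (i : Int) < num_of_entries →
    name_list[i]! ∈ expected_row_names → i < date_list.length
instance (expected_row_names : List String) (num_of_entries : Int) (date_list : List String) (name_list : List String) : Decidable (Pre_get_list_of_i_and_date_for_metric expected_row_names num_of_entries date_list name_list) := by unfold Pre_get_list_of_i_and_date_for_metric; infer_instance

def pvWitness_get_list_of_i_and_date_for_metric : List String × Int × List String × List String :=
  (["gold", "oil"], 2, ["2020-01-01", "2019-01-01"], ["oil", "gold"])

def Spec_get_list_of_i_and_date_for_metric (expected_row_names : List String) (num_of_entries : Int) (date_list : List String) (name_list : List String) (out : List (Int × String)) : Prop := out = get_list_of_i_and_date_for_metric_alt expected_row_names num_of_entries date_list name_list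
instance (expected_row_names : List String) (num_of_entries : Int) (date_list : List String) (name_list : List String) (out : List (Int × String)) : Decidable (Spec_get_list_of_i_and_date_for_metric expected_row_names num_of_entries date_list name_list out) := by unfold Spec_get_list_of_i_and_date_for_metric; infer_instance

-- ===== CLAIM (what is proved, stated in full; the proofs are below) =====
def Claim_equal_get_list_of_i_and_date_for_metric : Prop := ∀ (expected_row_names : List String) (num_of_entries : Int) (date_list : List String) (name_list : List String), Dom_get_list_of_i_and_date_for_metric expected_row_names num_of_entries date_list name_list → Pre_get_list_of_i_and_date_for_metric expected_row_names num_of_entries date_list name_list → Spec_get_list_of_i_and_date_for_metric expected_row_names num_of_entries date_list name_list (get_list_of_i_and_date_for_metric expected_row_names num_of_entries date_list name_list)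

-- ===== LEMMAS AND PROOFS =====

-- A's inner loop over the rows collects, after the accumulator, the matching rows in index order.
theorem pv_A_inner (n : Int) (dates names : List String) (en : String) (acc : List (Int × String)) :
    (PySem.List.pyRange 0 n 1).foldl (fun acc2 i =>
        if PySem.List.pyGetD names i "" == en then
          acc2 ++ [(i, PySem.List.pyGetD dates i "")]
        else acc2) acc
      = acc ++ ((PySem.List.pyRange 0 n 1).filter
          (fun i => PySem.List.pyGetD names i "" == en)).map
          (fun i => (i, PySem.List.pyGetD dates i "")) := by
  exact PySem.List.foldl_append_if _ _ _ _

-- B's grouping dict maps a name to the matching row indices, in index order.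
theorem pv_B_index (n : Int) (names : List String) (en : String) :
    ((((PySem.List.pyRange 0 n 1).map
        (fun i => (PySem.List.pyGetD names i "", i))).foldl
        (fun d p => d.modify p.1 [] (· ++ [p.2])) PySem.Dict.empty).getD en [])
      = (PySem.List.pyRange 0 n 1).filter (fun i => PySem.List.pyGetD names i "" == en) := by
  rw [PySem.Dict.getD_foldl_modify_append]
  simp [List.filter_map, Function.comp_def]

theorem pv_both_flat (expected : List String) (n : Int) (dates names : List String) :
    get_list_of_i_and_date_for_metric expected n dates names
      = get_list_of_i_and_date_for_metric_alt expected n dates names := by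
  unfold get_list_of_i_and_date_for_metric get_list_of_i_and_date_for_metric_alt
  simp only [pv_A_inner, PySem.List.foldl_append_singleton_eq_map, pv_B_index]

-- ===== VERDICT (by name: the statement is the Claim_ definition above) =====
theorem get_list_of_i_and_date_for_metric_spec : Claim_equal_get_list_of_i_and_date_for_metric := by
  intro e n d nl _ _
  unfold Spec_get_list_of_i_and_date_for_metric
  exact pv_both_flat e n d nl
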